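-- pv_equiv track=rewrite | github.com/hardenedpenguin/supermon-ng | user_files/sbin/ast_node_status_update.py | _format_alert_html
-- ===== SOURCE A (Python) =====
-- def _format_alert_html(enabled_text, has_alerts, alerts, custom_link, no_alerts_text="<span style='color: #FF0000;'>No Alerts</span>", max_len=None):
--     """Format alert data as HTML. Add full alerts only; stop before exceeding max_len (no mid-word truncation).
--     When max_len is set, use compact prefix/links so we can fit two full alerts (e.g. Brazoria)."""
--     if not has_alerts or not alerts:
--         return f'"{enabled_text}<br>{no_alerts_text}"'
--     compact = max_len is not None
--     if compact:
--         prefix = "<span style='color:SpringGreen'><b>SkywarnPlus-NG Enabled</b></span><br>"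
--     else:
--         prefix = f"{enabled_text}<br>"
--     total = prefix
--     first = True
--     for alert in alerts[:5]:
--         if not isinstance(alert, dict):
--             continue
--         event = alert.get('event', 'Unknown')
--         severity = alert.get('severity', 'Unknown')
--         if severity == 'Extreme':
--             color = '#FF0000'
--         elif severity == 'Severe':
--             color = '#FF6600'
--         elif severity == 'Moderate':
--             color = '#FFCC00'
--         elif severity == 'Minor':
--             color = '#FFFF00'
--         else:
--             color = '#FF0000'
--         if custom_link:
--             if compact:
--                 seg = f"<a href='{custom_link}' style='color:{color}'><b>{event}</b></a>"
--             else: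
--                 seg = f"<a target='WX ALERT' href='{custom_link}' style='color: {color}; text-decoration: none;'><b>{event}</b></a>"
--         else:
--             seg = f"<span style='color: {color};'><b>{event}</b></span>"
--         candidate = total + ("" if first else "<br>") + seg
--         if max_len is not None and len(candidate) > max_len:
--             break
--         total = candidate
--         first = False
--     if total == prefix:
--         head = prefix.rstrip("<br>") if compact else enabled_text
--         return f'"{head}<br>{no_alerts_text}"'
--     return f'"{total}"'
-- ===== SOURCE B (Python) =====
-- # Two-phase formatter: render the candidate alert segments first, then fit as many
-- # whole segments as the length budget allows, then assemble the quoted HTML string.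
--
-- SEVERITY_COLORS = {
--     'Extreme': '#FF0000',
--     'Severe': '#FF6600',
--     'Moderate': '#FFCC00',
--     'Minor': '#FFFF00',
-- }
-- COMPACT_PREFIX = "<span style='color:SpringGreen'><b>SkywarnPlus-NG Enabled</b></span><br>"
--
--
-- def _tags(color, custom_link, compact):
--     """Opening/closing HTML for one alert, as a (before, after) pair."""
--     if custom_link:
--         if compact:
--             return f"<a href='{custom_link}' style='color:{color}'><b>", "</b></a>"
--         return (f"<a target='WX ALERT' href='{custom_link}' style='color: {color}; text-decoration: none;'><b>",
--                 "</b></a>")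
--     return f"<span style='color: {color};'><b>", "</b></span>"
--
--
-- def _fit(segments, budget):
--     """Greedy prefix of segments whose joined length ('<br>' between items) stays within budget."""
--     kept = []
--     used = 0
--     for seg in segments:
--         cost = len(seg) + (4 if kept else 0)
--         if used + cost > budget:
--             break
--         used += cost
--         kept.append(seg)
--     return kept
--
--
-- def _format_alert_html(enabled_text, has_alerts, alerts, custom_link, no_alerts_text="<span style='color: #FF0000;'>No Alerts</span>", max_len=None):
--     if not has_alerts or not alerts:
--         return f'"{enabled_text}<br>{no_alerts_text}"'
--     compact = max_len is not None
--     prefix = COMPACT_PREFIX if compact else enabled_text + "<br>"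
--     segments = []
--     for alert in alerts[:5]:
--         if not isinstance(alert, dict):
--             continue
--         color = SEVERITY_COLORS.get(alert.get('severity', 'Unknown'), '#FF0000')
--         before, after = _tags(color, custom_link, compact)
--         segments.append(before + alert.get('event', 'Unknown') + after)
--     kept = segments if max_len is None else _fit(segments, max_len - len(prefix))
--     if not kept:
--         head = prefix.rstrip("<br>") if compact else enabled_text
--         return f'"{head}<br>{no_alerts_text}"'
--     return '"' + prefix + "<br>".join(kept) + '"'
-- ===== Notes on version B (the rewrite author's own statement) =====
-- stated objective: alternative
-- what changed: A builds the HTML by appending each candidate segment to one growing string with a first-flag inside a single loop; B first renders the (up to five) segments via a severity-to-color dict and an open/close tag-pair helper, then runs a separate greedy fitting pass over the rendered list with length arithmetic against the remaining budget, and joins prefix plus kept segments at the end.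
import Mathlib
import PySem

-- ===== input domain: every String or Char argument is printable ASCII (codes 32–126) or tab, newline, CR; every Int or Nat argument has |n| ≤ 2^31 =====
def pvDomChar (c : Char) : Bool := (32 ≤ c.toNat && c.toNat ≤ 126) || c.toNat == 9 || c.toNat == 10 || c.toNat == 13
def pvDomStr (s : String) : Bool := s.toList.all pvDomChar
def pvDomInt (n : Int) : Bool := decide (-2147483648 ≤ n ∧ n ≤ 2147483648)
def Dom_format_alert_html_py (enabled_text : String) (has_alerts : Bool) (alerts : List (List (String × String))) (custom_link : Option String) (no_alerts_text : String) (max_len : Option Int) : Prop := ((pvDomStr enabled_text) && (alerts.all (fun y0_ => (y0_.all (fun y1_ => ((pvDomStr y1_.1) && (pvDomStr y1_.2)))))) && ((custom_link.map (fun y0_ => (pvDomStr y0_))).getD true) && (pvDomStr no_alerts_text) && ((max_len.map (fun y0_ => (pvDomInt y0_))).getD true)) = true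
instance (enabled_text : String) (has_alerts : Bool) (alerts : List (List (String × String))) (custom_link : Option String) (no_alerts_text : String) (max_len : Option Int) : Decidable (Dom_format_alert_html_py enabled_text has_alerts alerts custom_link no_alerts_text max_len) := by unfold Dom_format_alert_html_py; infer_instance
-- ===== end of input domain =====

-- B renders the candidate alert segments first, then fits whole segments under the length budget in a
-- separate pass with length arithmetic, and joins at the end; same return value as A (objective: alternative).


-- ===== PORT A =====
-- A's severity → color if-chain
def pvColorA (severity : String) : String :=
  if severity == "Extreme" then "#FF0000"
  else if severity == "Severe" then "#FF6600"
  else if severity == "Moderate" then "#FFCC00"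
  else if severity == "Minor" then "#FFFF00"
  else "#FF0000"

-- the seg computed inside A's loop body (same values, same branch order)
def pvSegA (alert : List (String × String)) (custom_link : Option String) (compact : Bool) : String :=
  let event := (PySem.Dict.ofList alert).getD "event" "Unknown"
  let severity := (PySem.Dict.ofList alert).getD "severity" "Unknown"
  let color := pvColorA severity
  match custom_link with
  | some cl =>
    if cl = "" then "<span style='color: " ++ color ++ ";'><b>" ++ event ++ "</b></span>"
    else if compact then "<a href='" ++ cl ++ "' style='color:" ++ color ++ "'><b>" ++ event ++ "</b></a>"
    else "<a target='WX ALERT' href='" ++ cl ++ "' style='color: " ++ color ++ "; text-decoration: none;'><b>" ++ event ++ "</b></a>"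
  | none => "<span style='color: " ++ color ++ ";'><b>" ++ event ++ "</b></span>"

-- A's for-loop over alerts[:5] with state (total, first); break returns total
def pvLoopA (max_len : Option Int) (custom_link : Option String) (compact : Bool) :
    List (List (String × String)) → String → Bool → String
  | [], total, _ => total
  | alert :: rest, total, first =>
    let seg := pvSegA alert custom_link compact
    let candidate := total ++ (if first then "" else "<br>") ++ seg
    match max_len with
    | some m => if m < PySem.Str.len candidate then total
                else pvLoopA max_len custom_link compact rest candidate false
    | none => pvLoopA max_len custom_link compact rest candidate false

-- exact port of str.rstrip("<br>"): drop trailing characters belonging to {'<','b','r','>'}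
def pvRstripBr (s : String) : String :=
  String.ofList ((s.toList.reverse.dropWhile (fun c => c = '<' || c = 'b' || c = 'r' || c = '>')).reverse)

def format_alert_html_py (enabled_text : String) (has_alerts : Bool) (alerts : List (List (String × String))) (custom_link : Option String) (no_alerts_text : String) (max_len : Option Int) : String :=
  if has_alerts = false || alerts = [] then
    "\"" ++ enabled_text ++ "<br>" ++ no_alerts_text ++ "\""
  else
    let compact := max_len.isSome
    let pfx0 := if compact then "<span style='color:SpringGreen'><b>SkywarnPlus-NG Enabled</b></span><br>"
                  else enabled_text ++ "<br>"
    let total := pvLoopA max_len custom_link compact (PySem.List.slice alerts none (some 5)) pfx0 true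
    if total = pfx0 then
      let head := if compact then pvRstripBr pfx0 else enabled_text
      "\"" ++ head ++ "<br>" ++ no_alerts_text ++ "\""
    else
      "\"" ++ total ++ "\""

-- ===== PORT B =====
def pvPalette : PySem.Dict String String :=
  PySem.Dict.ofList [("Extreme", "#FF0000"), ("Severe", "#FF6600"), ("Moderate", "#FFCC00"), ("Minor", "#FFFF00")]

-- the (before, after) tag pair around one event
def pvTags (color : String) (custom_link : Option String) (compact : Bool) : String × String :=
  let link := custom_link.getD ""
  if link ≠ "" then
    if compact then ("<a href='" ++ link ++ "' style='color:" ++ color ++ "'><b>", "</b></a>")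
    else ("<a target='WX ALERT' href='" ++ link ++ "' style='color: " ++ color ++ "; text-decoration: none;'><b>", "</b></a>")
  else ("<span style='color: " ++ color ++ ";'><b>", "</b></span>")

-- one rendered segment (body of B's rendering loop)
def pvSegmentB (alert : List (String × String)) (custom_link : Option String) (compact : Bool) : String :=
  let d := PySem.Dict.ofList alert
  let t := pvTags (pvPalette.getD (d.getD "severity" "Unknown") "#FF0000") custom_link compact
  t.1 ++ d.getD "event" "Unknown" ++ t.2

-- B's fitting pass: greedy prefix of the segments within the budget
def pvFit (budget : Int) : List String → List String → Int → List String
  | [], kept, _ => kept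
  | seg :: rest, kept, used =>
    let cost : Int := PySem.Str.len seg + (if kept.isEmpty then 0 else 4)
    if budget < used + cost then kept
    else pvFit budget rest (kept ++ [seg]) (used + cost)

-- exact port of str.rstrip("<br>"): remove trailing characters drawn from {'<','b','r','>'}
def pvStripTrail (s : String) : String :=
  String.ofList (List.reverse (List.dropWhile (fun c => c ∈ ['<', 'b', 'r', '>']) s.toList.reverse))

def format_alert_html_py_alt (enabled_text : String) (has_alerts : Bool) (alerts : List (List (String × String))) (custom_link : Option String) (no_alerts_text : String) (max_len : Option Int) : String :=
  if has_alerts = false || alerts = [] then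
    "\"" ++ enabled_text ++ "<br>" ++ no_alerts_text ++ "\""
  else
    let compact := max_len.isSome
    let pfx0 := if compact then "<span style='color:SpringGreen'><b>SkywarnPlus-NG Enabled</b></span><br>"
                  else enabled_text ++ "<br>"
    let segments := (PySem.List.slice alerts none (some 5)).map (fun alert => pvSegmentB alert custom_link compact)
    let kept := match max_len with
      | none => segments
      | some m => pvFit (m - PySem.Str.len pfx0) segments [] 0
    if kept = [] then
      let head := if compact then pvStripTrail pfx0 else enabled_text
      "\"" ++ head ++ "<br>" ++ no_alerts_text ++ "\""
    else
      "\"" ++ pfx0 ++ PySem.Str.join "<br>" kept ++ "\""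

-- ===== PRECONDITION & SPEC =====
def Spec_format_alert_html_py (enabled_text : String) (has_alerts : Bool) (alerts : List (List (String × String))) (custom_link : Option String) (no_alerts_text : String) (max_len : Option Int) (out : String) : Prop := out = format_alert_html_py_alt enabled_text has_alerts alerts custom_link no_alerts_text max_len
instance (enabled_text : String) (has_alerts : Bool) (alerts : List (List (String × String))) (custom_link : Option String) (no_alerts_text : String) (max_len : Option Int) (out : String) : Decidable (Spec_format_alert_html_py enabled_text has_alerts alerts custom_link no_alerts_text max_len out) := by unfold Spec_format_alert_html_py; infer_instance

-- ===== CLAIM =====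
def Claim_equal_format_alert_html_py : Prop := ∀ (enabled_text : String) (has_alerts : Bool) (alerts : List (List (String × String))) (custom_link : Option String) (no_alerts_text : String) (max_len : Option Int), Dom_format_alert_html_py enabled_text has_alerts alerts custom_link no_alerts_text max_len → Spec_format_alert_html_py enabled_text has_alerts alerts custom_link no_alerts_text max_len (format_alert_html_py enabled_text has_alerts alerts custom_link no_alerts_text max_len)

-- ===== LEMMAS AND PROOFS =====

-- B's palette dict agrees with A's if-chain
set_option maxRecDepth 4096 in
lemma color_eq (sev : String) : pvPalette.getD sev "#FF0000" = pvColorA sev := by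
  have h : pvPalette
      = PySem.Dict.mk [("Extreme", "#FF0000"), ("Severe", "#FF6600"), ("Moderate", "#FFCC00"), ("Minor", "#FFFF00")] := by
    decide
  rw [h]
  simp only [PySem.Dict.getD, PySem.Dict.get?_mk_cons, pvColorA]
  clear h
  rcases eq_or_ne sev "Extreme" with h1 | h1
  · subst h1; decide
  rcases eq_or_ne sev "Severe" with h2 | h2
  · subst h2; decide
  rcases eq_or_ne sev "Moderate" with h3 | h3
  · subst h3; decide
  rcases eq_or_ne sev "Minor" with h4 | h4
  · subst h4; decide
  simp [PySem.Dict.get?, beq_iff_eq, h1, h2, h3, h4, Ne.symm h1, Ne.symm h2, Ne.symm h3, Ne.symm h4]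

-- the two segment renderings agree
lemma seg_eq (alert : List (String × String)) (cl : Option String) (cp : Bool) :
    pvSegA alert cl cp = pvSegmentB alert cl cp := by
  cases cl with
  | none => simp [pvSegA, pvSegmentB, pvTags, color_eq, String.append_assoc]
  | some c =>
    by_cases hc : c = "" <;> cases cp <;>
      simp [pvSegA, pvSegmentB, pvTags, color_eq, hc, String.append_assoc]

lemma charsJoin_snoc (sep p : List Char) :
    ∀ (ps : List (List Char)),
      PySem.Chars.join sep (ps ++ [p])
        = PySem.Chars.join sep ps ++ (if ps.isEmpty then [] else sep) ++ p
  | [] => by rw [List.nil_append, PySem.Chars.join_singleton, PySem.Chars.join_nil]; simp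
  | [x] => by
    rw [show ([x] ++ [p]) = [x, p] from rfl, PySem.Chars.join_cons_cons,
      PySem.Chars.join_singleton, PySem.Chars.join_singleton]; simp
  | x :: y :: rest => by
    have ih := charsJoin_snoc sep p (y :: rest)
    simp only [List.cons_append, PySem.Chars.join_cons_cons]
    simp only [List.cons_append] at ih
    rw [ih]
    simp [List.append_assoc]

-- join over a snoc
lemma join_snoc (acc : List String) (s : String) :
    PySem.Str.join "<br>" (acc ++ [s])
      = PySem.Str.join "<br>" acc ++ (if acc.isEmpty then "" else "<br>") ++ s := by
  rw [← String.toList_inj]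
  simp only [PySem.Str.toList_join, String.toList_append, List.map_append, List.map_cons,
    List.map_nil, charsJoin_snoc]
  cases acc <;> simp

lemma join_nil_str : PySem.Str.join "<br>" [] = "" := by
  rw [← String.toList_inj]
  simp [PySem.Str.toList_join, PySem.Chars.join_nil]

lemma join_cons_exists (a : String) (rest : List String) :
    ∃ t, PySem.Str.join "<br>" (a :: rest) = a ++ t := by
  cases rest with
  | nil =>
    refine ⟨"", ?_⟩
    rw [← String.toList_inj]
    simp [PySem.Str.toList_join, PySem.Chars.join_singleton]
  | cons y ys =>
    refine ⟨"<br>" ++ PySem.Str.join "<br>" (y :: ys), ?_⟩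
    rw [← String.toList_inj]
    simp [PySem.Str.toList_join, PySem.Chars.join_cons_cons]

-- length of a join over a snoc
lemma len_join_snoc (acc : List String) (s : String) :
    PySem.Str.len (PySem.Str.join "<br>" (acc ++ [s]))
      = PySem.Str.len (PySem.Str.join "<br>" acc) + (if acc.isEmpty then 0 else 4) + PySem.Str.len s := by
  rw [join_snoc, PySem.Str.len_append, PySem.Str.len_append]
  cases acc <;> simp

-- A's loop with max_len = None appends every segment
lemma loopA_none (cl : Option String) (cp : Bool) :
    ∀ (xs : List (List (String × String))) (pfx : String) (acc : List String),
      pvLoopA none cl cp xs (pfx ++ PySem.Str.join "<br>" acc) acc.isEmpty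
        = pfx ++ PySem.Str.join "<br>" (acc ++ xs.map (fun a => pvSegmentB a cl cp))
  | [], pfx, acc => by simp [pvLoopA]
  | x :: rest, pfx, acc => by
    have hcand : (pfx ++ PySem.Str.join "<br>" acc) ++ (if acc.isEmpty then "" else "<br>")
          ++ pvSegmentB x cl cp
        = pfx ++ PySem.Str.join "<br>" (acc ++ [pvSegmentB x cl cp]) := by
      rw [join_snoc]; simp [String.append_assoc]
    have ih := loopA_none cl cp rest pfx (acc ++ [pvSegmentB x cl cp])
    rw [show (acc ++ [pvSegmentB x cl cp]).isEmpty = false from by simp] at ih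
    simp only [pvLoopA, seg_eq, hcand, List.map_cons]
    rw [ih]
    simp

-- A's loop with max_len = m matches B's fitting pass (invariant: used = length of the joined accumulator)
lemma loopA_some (m : Int) (cl : Option String) (cp : Bool) :
    ∀ (xs : List (List (String × String))) (pfx : String) (acc : List String) (used : Int),
      used = PySem.Str.len (PySem.Str.join "<br>" acc) →
      pvLoopA (some m) cl cp xs (pfx ++ PySem.Str.join "<br>" acc) acc.isEmpty
        = pfx ++ PySem.Str.join "<br>" (pvFit (m - PySem.Str.len pfx) (xs.map (fun a => pvSegmentB a cl cp)) acc used)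
  | [], pfx, acc, used, hu => by simp [pvLoopA, pvFit]
  | x :: rest, pfx, acc, used, hu => by
    have hcand : (pfx ++ PySem.Str.join "<br>" acc) ++ (if acc.isEmpty then "" else "<br>")
          ++ pvSegmentB x cl cp
        = pfx ++ PySem.Str.join "<br>" (acc ++ [pvSegmentB x cl cp]) := by
      rw [join_snoc]; simp [String.append_assoc]
    have hlen : PySem.Str.len (pfx ++ PySem.Str.join "<br>" (acc ++ [pvSegmentB x cl cp]))
        = PySem.Str.len pfx + (used + (PySem.Str.len (pvSegmentB x cl cp) + (if acc.isEmpty then 0 else 4))) := by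
      rw [PySem.Str.len_append, len_join_snoc, hu]; ring
    have ih := loopA_some m cl cp rest pfx (acc ++ [pvSegmentB x cl cp])
      (used + (PySem.Str.len (pvSegmentB x cl cp) + (if acc.isEmpty then 0 else 4)))
      (by rw [len_join_snoc, hu]; ring)
    rw [show (acc ++ [pvSegmentB x cl cp]).isEmpty = false from by simp] at ih
    simp only [pvLoopA, pvFit, List.map_cons, seg_eq, hcand]
    have hiff : (m < PySem.Str.len (pfx ++ PySem.Str.join "<br>" (acc ++ [pvSegmentB x cl cp])))
        ↔ (m - PySem.Str.len pfx < used + (PySem.Str.len (pvSegmentB x cl cp) + (if acc.isEmpty then 0 else 4))) := by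
      rw [hlen]; constructor <;> intro <;> omega
    by_cases hbr : m - PySem.Str.len pfx < used + (PySem.Str.len (pvSegmentB x cl cp) + (if acc.isEmpty then 0 else 4))
    · rw [if_pos (hiff.mpr hbr), if_pos hbr]
    · rw [if_neg (fun h => hbr (hiff.mp h)), if_neg hbr]
      exact ih

-- every kept segment comes from the accumulator or the segment list
lemma fit_mem (b : Int) :
    ∀ (xs kept : List String) (used : Int) (x : String),
      x ∈ pvFit b xs kept used → x ∈ kept ∨ x ∈ xs
  | [], kept, used, x, h => Or.inl (by simpa [pvFit] using h)
  | s :: rest, kept, used, x, h => by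
    simp only [pvFit] at h
    split_ifs at h <;>
      first
        | exact Or.inl h
        | exact (fit_mem b rest _ _ _ h).elim
            (fun h' => (List.mem_append.mp h').elim Or.inl
              (fun h'' => Or.inr (by simp_all)))
            (fun h' => Or.inr (List.mem_cons_of_mem _ h'))

-- a rendered segment is nonempty
lemma seg_pos (alert : List (String × String)) (cl : Option String) (cp : Bool) :
    0 < PySem.Str.len (pvSegmentB alert cl cp) := by
  simp only [pvSegmentB, pvTags]
  by_cases h : (cl.getD "") ≠ ""
  · rw [if_pos h]
    cases cp <;>
      · simp only [Bool.false_eq_true, reduceIte, PySem.Str.len_append]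
        simp only [PySem.Str.len_eq]
        rw [show ("</b></a>" : String).toList.length = 8 from by decide]
        push_cast
        omega
  · rw [if_neg h]
    simp only [PySem.Str.len_append]
    simp only [PySem.Str.len_eq]
    rw [show ("</b></span>" : String).toList.length = 11 from by decide]
    push_cast
    omega

-- the compact prefix, right-stripped of {'<','b','r','>'}
lemma rstrip_compact :
    pvRstripBr "<span style='color:SpringGreen'><b>SkywarnPlus-NG Enabled</b></span><br>"
      = "<span style='color:SpringGreen'><b>SkywarnPlus-NG Enabled</b></span" := by
  decide

-- B's trailing-strip agrees with A's rstrip on the compact prefix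
lemma striptrail_compact :
    pvStripTrail "<span style='color:SpringGreen'><b>SkywarnPlus-NG Enabled</b></span><br>"
      = "<span style='color:SpringGreen'><b>SkywarnPlus-NG Enabled</b></span" := by
  decide

-- a nonempty join prepended with pfx is longer than pfx
lemma quote_ne_pfx (pfx k : String) (ks : List String) (hk : 0 < PySem.Str.len k) :
    pfx ++ PySem.Str.join "<br>" (k :: ks) ≠ pfx := by
  intro hEq
  rcases join_cons_exists k ks with ⟨t, ht⟩
  have := congrArg PySem.Str.len hEq
  rw [ht, PySem.Str.len_append, PySem.Str.len_append] at this
  have htn : 0 ≤ PySem.Str.len t := by rw [PySem.Str.len_eq]; positivity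
  omega

-- ===== VERDICT =====
theorem format_alert_html_py_spec : Claim_equal_format_alert_html_py := by
  intro e has alerts cl nat ml _dom
  unfold Spec_format_alert_html_py format_alert_html_py format_alert_html_py_alt
  by_cases h0 : (has = false || alerts = []) = true
  · simp only [h0, if_pos]
  · simp only [h0, if_neg, Bool.not_eq_true]
    have hne : alerts ≠ [] := by
      intro hnil; simp [hnil] at h0
    obtain ⟨a, rest, rfl⟩ := List.exists_cons_of_ne_nil hne
    have hslice : PySem.List.slice (a :: rest) none (some (5:Int)) = a :: rest.take 4 := by
      rw [PySem.List.slice_to (a :: rest) (b := 5) (by norm_num)]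
      rfl
    cases ml with
    | none =>
      -- compact = false; A appends every segment, B keeps every segment
      simp only [Option.isSome_none, Bool.false_eq_true, reduceIte]
      set pfxN := e ++ "<br>" with hpfxN
      have hloop := loopA_none cl false (PySem.List.slice (a :: rest) none (some 5)) pfxN []
      rw [join_nil_str] at hloop
      simp only [String.append_empty, List.isEmpty_nil, List.nil_append] at hloop
      rw [hloop, hslice]
      simp only [List.map_cons]
      rw [if_neg (quote_ne_pfx _ _ _ (seg_pos a cl false))]
      simp [String.append_assoc]
    | some m =>
      simp only [Option.isSome_some, reduceIte]
      set pfxC := "<span style='color:SpringGreen'><b>SkywarnPlus-NG Enabled</b></span><br>" with hpfxC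
      have hloop := loopA_some m cl true (PySem.List.slice (a :: rest) none (some 5)) pfxC []
        0 (by rw [join_nil_str]; decide)
      rw [join_nil_str] at hloop
      simp only [String.append_empty, List.isEmpty_nil] at hloop
      rw [hloop, hslice]
      simp only [List.map_cons]
      cases hkept : pvFit (m - PySem.Str.len pfxC) (pvSegmentB a cl true :: (rest.take 4).map (fun x => pvSegmentB x cl true)) [] 0 with
      | nil =>
        -- nothing fits: both return the stripped prefix plus the no-alerts text
        rw [join_nil_str]
        simp only [String.append_empty]
        simp only [if_true]
        rw [hpfxC, rstrip_compact, striptrail_compact]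
      | cons k ks =>
        have hkmem : k ∈ pvSegmentB a cl true :: (rest.take 4).map (fun x => pvSegmentB x cl true) := by
          have := fit_mem (m - PySem.Str.len pfxC) _ [] 0 k (by rw [hkept]; exact List.mem_cons_self)
          rcases this with h' | h'
          · simp at h'
          · exact h'
        have hkpos : 0 < PySem.Str.len k := by
          rcases List.mem_cons.mp hkmem with h' | h'
          · rw [h']; exact seg_pos a cl true
          · rcases List.mem_map.mp h' with ⟨y, _, hy⟩
            rw [← hy]; exact seg_pos y cl true
        rw [if_neg (quote_ne_pfx _ _ _ hkpos)]
        simp [String.append_assoc]
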